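-- pv_equiv track=rewrite | github.com/obedasare0-dot/unifiedapp | app/services/xlsx_writer.py | create_standard_headers
-- ===== SOURCE A (Python) =====
-- def create_standard_headers(num_fields: int) -> list[str]:
--     """Create standardized column headers for Product records.
--     Uses ONLY the 6 documented field names from Confluence documentation.
--     All other fields use generic Field_N naming.
--
--     Known fields (matching original PSA file structure):
--     - Field 0: Field_0 (contains 'Product')
--     - Field 1: UPC
--     - Field 5: Width_Inches
--     - Field 6: Height_Inches
--     - Field 7: Depth_Inches
--     - Field 8: Color
--     - Field 237: Front_Overhang_Inches
--     """
--     # ONLY the 6 documented fields from Walmart Confluence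
--     known_fields = {
--         1: 'UPC',
--         5: 'Width_Inches',
--         6: 'Height_Inches',
--         7: 'Depth_Inches',
--         8: 'Color',
--         237: 'Front_Overhang_Inches'
--     }
--
--     headers = []
--     for i in range(num_fields):
--         if i in known_fields:
--             headers.append(known_fields[i])
--         else:
--             headers.append(f'Field_{i}')
--
--     return headers
-- ===== SOURCE B (Python) =====
-- KNOWN_FIELDS = [
--     (1, 'UPC'),
--     (5, 'Width_Inches'),
--     (6, 'Height_Inches'),
--     (7, 'Depth_Inches'),
--     (8, 'Color'),
--     (237, 'Front_Overhang_Inches'),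
-- ]
--
--
-- def create_standard_headers(num_fields: int) -> list[str]:
--     """Segment concatenation: walk the (ascending) known fields and emit the
--     run of generic Field_N names before each known index, then its name;
--     finish with the generic tail. Never touches indexes >= num_fields."""
--     parts = []
--     prev = 0
--     for idx, name in KNOWN_FIELDS:
--         if idx >= num_fields:
--             break
--         parts.extend(f'Field_{j}' for j in range(prev, idx))
--         parts.append(name)
--         prev = idx + 1
--     parts.extend(f'Field_{j}' for j in range(prev, num_fields))
--     return parts
-- ===== Notes on version B (the rewrite author's own statement) =====
-- stated objective: alternative
-- what changed: B replaces A's per-index membership test over range(num_fields) with segment concatenation: it walks the ascending known-field list once, emitting the run of generic Field_N names before each known index and then the name (breaking when an index is out of range), and appends the generic tail.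
import Mathlib
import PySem

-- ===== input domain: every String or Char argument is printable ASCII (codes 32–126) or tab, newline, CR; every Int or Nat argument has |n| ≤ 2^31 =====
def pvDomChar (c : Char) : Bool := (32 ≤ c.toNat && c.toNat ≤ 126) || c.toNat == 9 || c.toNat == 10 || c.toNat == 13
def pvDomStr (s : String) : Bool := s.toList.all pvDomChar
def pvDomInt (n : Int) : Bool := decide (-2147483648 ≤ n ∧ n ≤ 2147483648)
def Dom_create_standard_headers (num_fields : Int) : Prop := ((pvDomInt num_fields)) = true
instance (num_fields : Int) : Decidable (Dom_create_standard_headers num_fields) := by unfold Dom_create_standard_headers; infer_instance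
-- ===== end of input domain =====

-- B replaces A's per-index membership test with segment concatenation over the ascending
-- known-field list (generic run before each known index, then its name, then the tail);
-- objective: alternative algorithm, same cost.

-- ===== PORT A =====
-- A's known_fields dict literal (distinct keys, insertion order)
def pvKnownA : PySem.Dict Int String :=
  PySem.Dict.mk [(1, "UPC"), (5, "Width_Inches"), (6, "Height_Inches"),
                 (7, "Depth_Inches"), (8, "Color"), (237, "Front_Overhang_Inches")]

def create_standard_headers (num_fields : Int) : List String :=
  (PySem.List.pyRange 0 num_fields 1).foldl
    (fun headers i =>
      if pvKnownA.contains i then headers ++ [pvKnownA.getD i ""]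
      else headers ++ ["Field_" ++ PySem.Int.toStr i]) []

-- ===== PORT B =====
-- B's module-level KNOWN_FIELDS list, in source order (ascending indices)
def pvKnownItems : List (Int × String) :=
  [(1, "UPC"), (5, "Width_Inches"), (6, "Height_Inches"),
   (7, "Depth_Inches"), (8, "Color"), (237, "Front_Overhang_Inches")]

-- B's for-loop with break, then the tail extend; structural recursion on the item list
def pvSegLoop (n : Int) : List (Int × String) → Int → List String → List String
  | [], prev, parts =>
      parts ++ (PySem.List.pyRange prev n 1).map (fun j => "Field_" ++ PySem.Int.toStr j)
  | (idx, name) :: rest, prev, parts =>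
      if n ≤ idx then  -- break: emit the generic tail from prev
        parts ++ (PySem.List.pyRange prev n 1).map (fun j => "Field_" ++ PySem.Int.toStr j)
      else
        pvSegLoop n rest (idx + 1)
          (parts ++ (PySem.List.pyRange prev idx 1).map (fun j => "Field_" ++ PySem.Int.toStr j)
                 ++ [name])

def create_standard_headers_alt (num_fields : Int) : List String :=
  pvSegLoop num_fields pvKnownItems 0 []

-- ===== PRECONDITION & SPEC =====
def Spec_create_standard_headers (num_fields : Int) (out : List String) : Prop := out = create_standard_headers_alt num_fields
instance (num_fields : Int) (out : List String) : Decidable (Spec_create_standard_headers num_fields out) := by unfold Spec_create_standard_headers; infer_instance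

-- ===== CLAIM (what is proved, stated in full; the proofs are below) =====
def Claim_equal_create_standard_headers : Prop := ∀ (num_fields : Int), Dom_create_standard_headers num_fields → Spec_create_standard_headers num_fields (create_standard_headers num_fields)

-- ===== LEMMAS AND PROOFS =====

-- A's per-index branch as a function (the map A's append-loop computes)
def pvF (i : Int) : String :=
  if pvKnownA.contains i then pvKnownA.getD i "" else "Field_" ++ PySem.Int.toStr i

-- A's loop is the map of pvF over the range
lemma pvA_eq_map (n : Int) :
    create_standard_headers n = (PySem.List.pyRange 0 n 1).map pvF := by
  unfold create_standard_headers
  have he : (fun (headers : List String) (i : Int) =>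
        if pvKnownA.contains i then headers ++ [pvKnownA.getD i ""]
        else headers ++ ["Field_" ++ PySem.Int.toStr i])
      = (fun headers i => headers ++ [pvF i]) := by
    funext h i; unfold pvF; split <;> rfl
  rw [he, PySem.List.foldl_append_singleton_eq_map, List.nil_append]

-- on a segment free of known indices, pvF is the generic name
lemma pvSeg_gen (a b : Int) (h : ∀ i, a ≤ i → i < b → pvKnownA.contains i = false) :
    (PySem.List.pyRange a b 1).map pvF
      = (PySem.List.pyRange a b 1).map (fun j => "Field_" ++ PySem.Int.toStr j) := by
  apply List.map_congr_left
  intro i hi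
  rw [PySem.List.mem_pyRange_one] at hi
  unfold pvF
  rw [if_neg (by simp [h i hi.1 hi.2])]

-- the loop invariant: while items holds exactly the not-yet-passed known fields,
-- pvSegLoop produces parts ++ the pvF-image of the remaining range
lemma pvSegLoop_eq (n : Int) :
    ∀ (items : List (Int × String)) (prev : Int) (parts : List String),
      (∀ p ∈ items, prev ≤ p.1) →
      (items.map Prod.fst).Pairwise (· < ·) →
      (∀ p ∈ items, pvKnownA.contains p.1 = true ∧ pvKnownA.getD p.1 "" = p.2) →
      (∀ i : Int, prev ≤ i → pvKnownA.contains i = true → i ∈ items.map Prod.fst) →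
      pvSegLoop n items prev parts = parts ++ (PySem.List.pyRange prev n 1).map pvF
  | [], prev, parts, _, _, _, h4 => by
      rw [pvSegLoop, pvSeg_gen]
      intro i hpi _
      by_contra hc
      have := h4 i hpi (by revert hc; cases pvKnownA.contains i <;> simp)
      simp at this
  | (idx, name) :: rest, prev, parts, h1, h2, h3, h4 => by
      rw [pvSegLoop]
      have hprev : prev ≤ idx := h1 (idx, name) (by simp)
      simp only [List.map_cons] at h2
      have h2' := List.pairwise_cons.mp h2
      have hrest_gt : ∀ p ∈ rest, idx < p.1 := by
        intro p hp
        exact h2'.1 p.1 (List.mem_map.mpr ⟨p, hp, rfl⟩)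
      split_ifs with hb
      · -- break: no known index remains below n
        rw [pvSeg_gen]
        intro i hpi hin
        by_contra hc
        have hmem := h4 i hpi (by revert hc; cases pvKnownA.contains i <;> simp)
        simp at hmem
        rcases hmem with h | h
        · omega
        · rcases h with ⟨b, hb2⟩
          have := hrest_gt (i, b) hb2
          simp at this; omega
      · -- step: split the range at idx and idx+1
        rw [pvSegLoop_eq n rest (idx + 1)
              (parts ++ (PySem.List.pyRange prev idx 1).map
                  (fun j => "Field_" ++ PySem.Int.toStr j) ++ [name])
              (fun p hp => by have := hrest_gt p hp; omega)
              h2'.2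
              (fun p hp => h3 p (by simp [hp]))
              (by
                intro i hi hc
                have := h4 i (by omega) hc
                simp at this ⊢
                rcases this with h | h
                · omega
                · exact h)]
        rw [PySem.List.pyRange_one_append prev idx n hprev (by omega),
            PySem.List.pyRange_one_append idx (idx + 1) n (by omega) (by omega),
            PySem.List.pyRange_one_singleton]
        simp only [List.map_append, List.map_cons, List.map_nil]
        have hf : pvF idx = name := by
          have := h3 (idx, name) (by simp)
          unfold pvF; rw [if_pos (by simp [this.1]), this.2]
        rw [pvSeg_gen prev idx (by
          intro i hpi hlt
          by_contra hc
          have hmem := h4 i hpi (by revert hc; cases pvKnownA.contains i <;> simp)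
          simp at hmem
          rcases hmem with h | h
          · omega
          · rcases h with ⟨b, hb2⟩
            have := hrest_gt (i, b) hb2
            simp at this; omega)]
        simp [hf]

lemma pvMain (n : Int) : create_standard_headers n = create_standard_headers_alt n := by
  rw [pvA_eq_map]
  unfold create_standard_headers_alt
  rw [pvSegLoop_eq n pvKnownItems 0 []
        (by decide)
        (by decide)
        (by decide)
        (by intro i _ hc
            simp [pvKnownA, PySem.Dict.contains_mk] at hc
            simp [pvKnownItems]
            omega)]
  simp

-- ===== VERDICT (by name: the statement is the Claim_ definition above) =====
theorem create_standard_headers_spec : Claim_equal_create_standard_headers := by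
  intro n _
  unfold Spec_create_standard_headers
  exact pvMain n
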